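-- pv_equiv track=rewrite | github.com/yamaceay/dp | methods/dp/_dpmlm.py | _nth_replace
-- ===== SOURCE A (Python) =====
-- def _nth_replace(text: str, target: str, replacement: str, occurrence: int) -> str:
--     parts = text.split()
--     count = 0
--     for i, part in enumerate(parts):
--         if part == target:
--             count += 1
--             if count == occurrence:
--                 parts[i] = replacement
--                 break
--     return " ".join(parts)
-- ===== SOURCE B (Python) =====
-- def _nth_replace(text: str, target: str, replacement: str, occurrence: int) -> str:
--     def go(ws, k):
--         if not ws:
--             return []
--         w, rest = ws[0], ws[1:]
--         if w == target:
--             if k == 1: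
--                 return [replacement] + rest
--             return [w] + go(rest, k - 1)
--         return [w] + go(rest, k)
--     return " ".join(go(text.split(), occurrence))
-- ===== Notes on version B (the rewrite author's own statement) =====
-- stated objective: alternative
-- what changed: B replaces A's iterative enumerate-count-and-mutate-in-place loop with break by a pure structural recursion that rebuilds the word list, decrementing the remaining occurrence count and splicing in the replacement at the base case; it never indexes or mutates the list.
import Mathlib
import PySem

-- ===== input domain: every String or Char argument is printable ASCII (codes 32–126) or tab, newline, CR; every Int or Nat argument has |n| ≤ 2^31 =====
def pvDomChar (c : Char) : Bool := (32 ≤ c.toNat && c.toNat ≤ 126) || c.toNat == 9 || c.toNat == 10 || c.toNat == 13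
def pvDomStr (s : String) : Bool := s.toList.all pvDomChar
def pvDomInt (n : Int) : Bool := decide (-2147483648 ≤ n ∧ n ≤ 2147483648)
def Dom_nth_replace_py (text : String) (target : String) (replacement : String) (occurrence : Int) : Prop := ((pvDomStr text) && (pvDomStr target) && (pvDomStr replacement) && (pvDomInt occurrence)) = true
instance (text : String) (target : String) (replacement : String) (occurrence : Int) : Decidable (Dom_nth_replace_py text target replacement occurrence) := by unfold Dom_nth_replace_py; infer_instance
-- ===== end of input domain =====

-- B rebuilds the word list by pure structural recursion (splicing in the replacement at
-- the base case) instead of A's enumerate-count-and-mutate loop (objective: alternative).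

-- ===== PORT A =====
-- the for-loop of A, with (count, parts) as state and break modelled by returning early
def nthReplaceLoopA (pairs : List (Int × String)) (target replacement : String)
    (occurrence : Int) (count : Int) (parts : List String) : List String :=
  match pairs with
  | [] => parts
  | (i, part) :: rest =>
    if part == target then
      if count + 1 == occurrence then PySem.List.pySetD parts i replacement
      else nthReplaceLoopA rest target replacement occurrence (count + 1) parts
    else nthReplaceLoopA rest target replacement occurrence count parts

def nth_replace_py (text : String) (target : String) (replacement : String) (occurrence : Int) : String :=
  let parts := PySem.Str.split₀ text
  PySem.Str.join " " (nthReplaceLoopA (PySem.List.enumerate parts 0) target replacement occurrence 0 parts)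

-- ===== PORT B =====
-- the inner recursive helper 'go' of Source B
def nthReplaceGoB (ws : List String) (target replacement : String) (k : Int) : List String :=
  match ws with
  | [] => []
  | w :: rest =>
    if w == target then
      if k == 1 then replacement :: rest
      else w :: nthReplaceGoB rest target replacement (k - 1)
    else w :: nthReplaceGoB rest target replacement k

def nth_replace_py_alt (text : String) (target : String) (replacement : String) (occurrence : Int) : String :=
  PySem.Str.join " " (nthReplaceGoB (PySem.Str.split₀ text) target replacement occurrence)

-- ===== PRECONDITION & SPEC =====
def Spec_nth_replace_py (text : String) (target : String) (replacement : String) (occurrence : Int) (out : String) : Prop := out = nth_replace_py_alt text target replacement occurrence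
instance (text : String) (target : String) (replacement : String) (occurrence : Int) (out : String) : Decidable (Spec_nth_replace_py text target replacement occurrence out) := by unfold Spec_nth_replace_py; infer_instance

-- ===== CLAIM =====
def Claim_equal_nth_replace_py : Prop := ∀ (text : String) (target : String) (replacement : String) (occurrence : Int), Dom_nth_replace_py text target replacement occurrence → Spec_nth_replace_py text target replacement occurrence (nth_replace_py text target replacement occurrence)

-- ===== LEMMAS AND PROOFS =====

theorem set_append_length {α : Type} (pre : List α) (w v : α) (rest : List α) :
    (pre ++ w :: rest).set pre.length v = pre ++ v :: rest := by
  induction pre with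
  | nil => rfl
  | cons h t ih => simp [ih]

-- A's loop over the enumeration of ws (offset pre.length) on the list pre ++ ws equals
-- pre ++ B's recursion on ws with remaining count (occurrence - count)
theorem loopA_eq_goB (target replacement : String) (occurrence : Int) :
    ∀ (ws pre : List String) (c : Int),
    nthReplaceLoopA (PySem.List.enumerate ws (pre.length : Int)) target replacement occurrence c (pre ++ ws)
      = pre ++ nthReplaceGoB ws target replacement (occurrence - c) := by
  intro ws
  induction ws with
  | nil => intro pre c; simp [PySem.List.enumerate_nil, nthReplaceLoopA, nthReplaceGoB]
  | cons w rest ih =>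
    intro pre c
    rw [PySem.List.enumerate_cons]
    by_cases hwt : w = target
    · have hwt' : (w == target) = true := by simp [hwt]
      by_cases hco : c + 1 = occurrence
      · have h1 : (occurrence - c == 1) = true := by simp; omega
        have hco' : (c + 1 == occurrence) = true := by simp [hco]
        simp only [nthReplaceLoopA, nthReplaceGoB, hwt', hco', h1, if_true,
          PySem.List.pySetD_natCast]
        exact set_append_length pre w replacement rest
      · have h1 : (occurrence - c == 1) = false := by simp; omega
        have hco' : (c + 1 == occurrence) = false := by simp [hco]
        simp only [nthReplaceLoopA, nthReplaceGoB, hwt', hco', h1, if_true,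
          Bool.false_eq_true, if_false]
        have hlen : ((pre.length : Int) + 1) = (((pre ++ [w]).length : Int)) := by
          simp
        have hprw : pre ++ w :: rest = (pre ++ [w]) ++ rest := by simp
        rw [hlen, hprw, ih (pre ++ [w]) (c + 1)]
        have : occurrence - (c + 1) = occurrence - c - 1 := by omega
        simp [this]
    · have hwt' : (w == target) = false := by simp [hwt]
      simp only [nthReplaceLoopA, nthReplaceGoB, hwt', Bool.false_eq_true, if_false]
      have hlen : ((pre.length : Int) + 1) = (((pre ++ [w]).length : Int)) := by simp
      have hprw : pre ++ w :: rest = (pre ++ [w]) ++ rest := by simp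
      rw [hlen, hprw, ih (pre ++ [w]) c]
      simp

-- ===== VERDICT =====
theorem nth_replace_py_spec : Claim_equal_nth_replace_py := by
  intro text target replacement occurrence _
  simp only [Spec_nth_replace_py, nth_replace_py, nth_replace_py_alt]
  have h := loopA_eq_goB target replacement occurrence (PySem.Str.split₀ text) [] 0
  exact congrArg (PySem.Str.join " ") (by simpa using h)
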